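-- pv_equiv track=rewrite | github.com/shreyaspadhye3011/MIT6.0 | BarnYard.py | barnYard1
-- ===== SOURCE A (Python) =====
-- def barnYard1(numHeads, numLegs):
-- 	""" Returns number of [chickens, pigs, spiders] for a given [int numberOfHeads, int numberOfLegs] """
-- 	for numPigs in range(0, numHeads + 1):
-- 		for numChickens in range(0, (numHeads - numPigs) + 1):
-- 			numSpiders = numHeads - numPigs - numChickens;
-- 			numCalLegs = (4 * numPigs) + (4 * numSpiders) + (2 * numChickens);
-- 			if (numCalLegs == numLegs):
-- 				return [numPigs, numChickens, numSpiders];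
-- 	return [None, None, None];
-- ===== SOURCE B (Python) =====
-- def barnYard1(numHeads, numLegs):
--     """ Returns number of [chickens, pigs, spiders] for a given [int numberOfHeads, int numberOfLegs] """
--     # legs = 4*pigs + 4*spiders + 2*chickens = 4*heads - 2*chickens, independent of pigs,
--     # so the first solution the search would find has pigs = 0 and chickens = (4*heads - legs)/2.
--     if numHeads >= 0 and numLegs % 2 == 0:
--         c = (4 * numHeads - numLegs) // 2
--         if 0 <= c <= numHeads:
--             return [0, c, numHeads - c]
--     return [None, None, None]
-- ===== Notes on version B (the rewrite author's own statement) =====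
-- stated objective: faster
-- what changed: Replaced the O(heads^2) nested search with an O(1) closed form: legs = 4*heads - 2*chickens independent of pigs, so the first hit has pigs=0 and chickens=(4*heads-legs)/2, validated by parity and range checks.
import Mathlib
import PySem

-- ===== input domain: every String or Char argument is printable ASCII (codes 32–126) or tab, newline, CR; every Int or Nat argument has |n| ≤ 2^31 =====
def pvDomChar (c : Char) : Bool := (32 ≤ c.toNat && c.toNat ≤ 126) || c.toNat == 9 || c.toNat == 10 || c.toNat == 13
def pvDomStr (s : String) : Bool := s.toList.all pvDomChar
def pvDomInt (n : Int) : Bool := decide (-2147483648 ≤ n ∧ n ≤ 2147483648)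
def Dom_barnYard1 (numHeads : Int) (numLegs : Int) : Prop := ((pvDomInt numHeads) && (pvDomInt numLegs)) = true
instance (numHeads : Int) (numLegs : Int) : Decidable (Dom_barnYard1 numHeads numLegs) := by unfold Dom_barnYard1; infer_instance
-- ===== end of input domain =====

-- B replaces A's O(numHeads^2) nested search by an O(1) closed form (pigs = 0,
-- chickens = (4*heads - legs)/2 with parity/range checks); return values are equal everywhere.

-- ===== PORT A =====
-- early-return nested loops, rendered as findSome? over the same ranges
def barnYard1 (numHeads : Int) (numLegs : Int) : List (Option Int) :=
  match (PySem.List.pyRange 0 (numHeads + 1) 1).findSome? (fun numPigs =>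
      (PySem.List.pyRange 0 ((numHeads - numPigs) + 1) 1).findSome? (fun numChickens =>
        let numSpiders := numHeads - numPigs - numChickens
        let numCalLegs := (4 * numPigs) + (4 * numSpiders) + (2 * numChickens)
        if numCalLegs = numLegs then
          some [some numPigs, some numChickens, some numSpiders]
        else none)) with
  | some r => r
  | none => [none, none, none]

-- ===== PORT B =====
def barnYard1_alt (numHeads : Int) (numLegs : Int) : List (Option Int) :=
  if 0 ≤ numHeads ∧ PySem.Int.mod numLegs 2 = 0 then
    let c := PySem.Int.floordiv (4 * numHeads - numLegs) 2
    if 0 ≤ c ∧ c ≤ numHeads then [some 0, some c, some (numHeads - c)]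
    else [none, none, none]
  else [none, none, none]

-- ===== PRECONDITION & SPEC =====
def Spec_barnYard1 (numHeads : Int) (numLegs : Int) (out : List (Option Int)) : Prop := out = barnYard1_alt numHeads numLegs
instance (numHeads : Int) (numLegs : Int) (out : List (Option Int)) : Decidable (Spec_barnYard1 numHeads numLegs out) := by unfold Spec_barnYard1; infer_instance

-- ===== CLAIM (what is proved, stated in full; the proofs are below) =====
def Claim_equal_barnYard1 : Prop := ∀ (numHeads : Int) (numLegs : Int), Dom_barnYard1 numHeads numLegs → Spec_barnYard1 numHeads numLegs (barnYard1 numHeads numLegs)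

-- ===== LEMMAS AND PROOFS =====

-- The inner loop over chickens in [a, b): the test 4p + 4(h-p-c) + 2c = l is 4h - 2c = l,
-- whose unique solution is c0 = (4h - l)/2; the scan returns it iff it is even and in range.
theorem inner_findSome (h l p : Int) : ∀ (k : Nat) (a b : Int), (b - a).toNat = k →
    (PySem.List.pyRange a b 1).findSome? (fun c =>
        if 4 * p + 4 * (h - p - c) + 2 * c = l then some [some p, some c, some (h - p - c)]
        else none)
    = if 2 ∣ (4 * h - l) ∧ a ≤ (4 * h - l) / 2 ∧ (4 * h - l) / 2 < b then
        some [some p, some ((4 * h - l) / 2), some (h - p - (4 * h - l) / 2)]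
      else none := by
  intro k
  induction k with
  | zero =>
    intro a b hk
    rw [PySem.List.pyRange_one_eq_nil (by omega)]
    simp only [List.findSome?_nil]
    split_ifs with hc
    · exact absurd hc (by omega)
    · rfl
  | succ k ih =>
    intro a b hk
    rw [PySem.List.pyRange_one_cons (by omega)]
    simp only [List.findSome?_cons]
    by_cases ha : 4 * p + 4 * (h - p - a) + 2 * a = l
    · have hl : l = 4 * h - 2 * a := by linarith
      rw [if_pos ha]
      have hc : 2 ∣ (4 * h - l) ∧ a ≤ (4 * h - l) / 2 ∧ (4 * h - l) / 2 < b :=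
        ⟨⟨a, by omega⟩, by omega, by omega⟩
      rw [if_pos hc, show (4 * h - l) / 2 = a by omega]
    · rw [if_neg ha]
      rw [ih (a + 1) b (by omega)]
      have heq : (2 ∣ (4 * h - l) ∧ a + 1 ≤ (4 * h - l) / 2 ∧ (4 * h - l) / 2 < b)
          ↔ (2 ∣ (4 * h - l) ∧ a ≤ (4 * h - l) / 2 ∧ (4 * h - l) / 2 < b) := by
        constructor
        · rintro ⟨hd, h1, h2⟩; exact ⟨hd, by omega, h2⟩
        · rintro ⟨hd, h1, h2⟩
          refine ⟨hd, ?_, h2⟩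
          rcases eq_or_lt_of_le h1 with he | hlt
          · exfalso
            apply ha
            have hl : l = 4 * h - 2 * a := by omega
            linarith
          · omega
      exact if_congr heq rfl rfl

theorem barnYard1_eq_alt (h l : Int) : barnYard1 h l = barnYard1_alt h l := by
  have hmod : PySem.Int.mod l 2 = l % 2 := PySem.Int.mod_eq_emod_of_pos (by omega)
  have hfd : PySem.Int.floordiv (4 * h - l) 2 = (4 * h - l) / 2 :=
    PySem.Int.floordiv_eq_ediv_of_pos (by omega)
  unfold barnYard1 barnYard1_alt
  by_cases h0 : 0 ≤ h
  · rw [PySem.List.pyRange_one_cons (a := 0) (by omega)]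
    simp only [List.findSome?_cons]
    rw [inner_findSome h l 0 (h - 0 + 1 - 0).toNat 0 (h - 0 + 1) rfl]
    by_cases hc : 2 ∣ (4 * h - l) ∧ 0 ≤ (4 * h - l) / 2 ∧ (4 * h - l) / 2 < h - 0 + 1
    · rw [if_pos hc]
      rw [if_pos ⟨h0, by rw [hmod]; omega⟩]
      rw [if_pos (by rw [hfd]; omega)]
      simp only [hfd]
      norm_num
    · rw [if_neg hc]
      have hrest : (PySem.List.pyRange (0 + 1) (h + 1) 1).findSome? (fun numPigs =>
          (PySem.List.pyRange 0 (h - numPigs + 1) 1).findSome? (fun numChickens =>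
            if 4 * numPigs + 4 * (h - numPigs - numChickens) + 2 * numChickens = l then
              some [some numPigs, some numChickens, some (h - numPigs - numChickens)]
            else none)) = none := by
        rw [List.findSome?_eq_none_iff]
        intro p hp
        rw [PySem.List.mem_pyRange_one] at hp
        rw [inner_findSome h l p (h - p + 1 - 0).toNat 0 (h - p + 1) rfl]
        rw [if_neg (by rintro ⟨hd, h1, h2⟩; exact hc ⟨hd, h1, by omega⟩)]
      rw [hrest]
      by_cases hb : 0 ≤ h ∧ PySem.Int.mod l 2 = 0
      · rw [if_pos hb]
        rw [if_neg (by rw [hfd]; rw [hmod] at hb; rintro ⟨hr1, hr2⟩; exact hc ⟨by omega, by omega, by omega⟩)]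
      · rw [if_neg hb]
  · rw [PySem.List.pyRange_one_eq_nil (by omega)]
    simp only [List.findSome?_nil]
    rw [if_neg (by rintro ⟨ha, _⟩; exact h0 ha)]

-- ===== VERDICT (by name: the statement is the Claim_ definition above) =====
theorem barnYard1_spec : Claim_equal_barnYard1 := by
  intro numHeads numLegs _
  exact barnYard1_eq_alt numHeads numLegs
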